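-- pv_equiv track=rewrite | github.com/dhmit/prompted_readings | analysis/analysis.py | detect_string_at_index
-- ===== SOURCE A (Python) =====
-- def detect_string_at_index(base_string, start_index, string_segment):
--     if start_index > len(base_string):
--         return False
--     elif len(string_segment) == 0:
--         return True
--     if not start_index >= len(base_string):
--         if base_string[start_index] == string_segment[0]:
--             return detect_string_at_index(base_string, start_index + 1, string_segment[1:])
--         elif base_string[start_index] != string_segment[0]:
--             return False
--     else:
--         return False
-- ===== SOURCE B (Python) =====
-- def detect_string_at_index(base_string, start_index, string_segment):
--     # Iterative index walk instead of A's recursion; same Python indexing semantics.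
--     if start_index > len(base_string):
--         return False
--     i = start_index
--     for ch in string_segment:
--         if i >= len(base_string):
--             return False
--         if base_string[i] != ch:
--             return False
--         i += 1
--     return True
-- ===== Notes on version B (the rewrite author's own statement) =====
-- stated objective: faster
-- what changed: Replaces A's recursion (rebuilding string_segment[1:] at each step) with a single iterative loop walking an index over the segment's characters; no slicing and no recursive calls.
import Mathlib
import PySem

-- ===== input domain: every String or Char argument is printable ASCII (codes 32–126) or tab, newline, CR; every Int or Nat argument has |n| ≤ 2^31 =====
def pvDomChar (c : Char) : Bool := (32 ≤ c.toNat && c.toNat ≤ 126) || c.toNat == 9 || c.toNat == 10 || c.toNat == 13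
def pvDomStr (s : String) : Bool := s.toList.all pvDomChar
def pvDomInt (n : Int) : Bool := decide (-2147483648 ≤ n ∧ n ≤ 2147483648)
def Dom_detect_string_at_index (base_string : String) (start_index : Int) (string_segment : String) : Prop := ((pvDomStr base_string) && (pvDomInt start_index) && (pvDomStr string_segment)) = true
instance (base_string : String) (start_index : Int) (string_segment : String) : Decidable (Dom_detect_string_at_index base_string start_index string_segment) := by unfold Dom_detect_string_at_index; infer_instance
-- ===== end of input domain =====

-- B replaces A's recursion (which slices string_segment[1:] each call) by one iterative
-- pass with an index; equivalence is about the return value on inputs where A returns.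

-- ===== PORT A =====
-- literal recursion of A on (start_index, string_segment); pyGet? none = IndexError (excluded by Pre_)
def detectGoA (bs : List Char) (i : Int) (s : List Char) : Bool :=
  if i > (bs.length : Int) then false
  else
    match s with
    | [] => true
    | c :: rest =>
      if ¬ (i ≥ (bs.length : Int)) then
        match PySem.List.pyGet? bs i with
        | none => false            -- Python raises IndexError here; outside Pre_
        | some bc => if bc = c then detectGoA bs (i + 1) rest else false
      else false

def detect_string_at_index (base_string : String) (start_index : Int) (string_segment : String) : Bool :=
  detectGoA base_string.toList start_index string_segment.toList

-- ===== PORT B =====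
-- one step of B's for-loop; state none = returned False (or IndexError, outside Pre_)
def detectStepB (bs : List Char) (st : Option Int) (ch : Char) : Option Int :=
  match st with
  | none => none
  | some j =>
    if j ≥ (bs.length : Int) then none
    else
      match PySem.List.pyGet? bs j with
      | none => none               -- Python raises IndexError here; outside Pre_
      | some c => if c ≠ ch then none else some (j + 1)

def detect_string_at_index_alt (base_string : String) (start_index : Int) (string_segment : String) : Bool :=
  if start_index > (base_string.toList.length : Int) then false
  else (string_segment.toList.foldl (detectStepB base_string.toList) (some start_index)).isSome

-- ===== PRECONDITION & SPEC =====
-- Pre_ excludes exactly the inputs where A raises IndexError (negative start_index below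
-- -len(base_string) with a nonempty segment); B raises the same exception there.
def Pre_detect_string_at_index (base_string : String) (start_index : Int) (string_segment : String) : Prop :=
  string_segment = "" ∨ -(base_string.toList.length : Int) ≤ start_index

instance (base_string : String) (start_index : Int) (string_segment : String) : Decidable (Pre_detect_string_at_index base_string start_index string_segment) := by unfold Pre_detect_string_at_index; infer_instance

def pvWitness_detect_string_at_index : String × Int × String := ("abc", 1, "bc")

def Spec_detect_string_at_index (base_string : String) (start_index : Int) (string_segment : String) (out : Bool) : Prop := out = detect_string_at_index_alt base_string start_index string_segment
instance (base_string : String) (start_index : Int) (string_segment : String) (out : Bool) : Decidable (Spec_detect_string_at_index base_string start_index string_segment out) := by unfold Spec_detect_string_at_index; infer_instance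

-- ===== CLAIM (what is proved, stated in full; the proofs are below) =====
def Claim_equal_detect_string_at_index : Prop := ∀ (base_string : String) (start_index : Int) (string_segment : String), Dom_detect_string_at_index base_string start_index string_segment → Pre_detect_string_at_index base_string start_index string_segment → Spec_detect_string_at_index base_string start_index string_segment (detect_string_at_index base_string start_index string_segment)

-- ===== LEMMAS AND PROOFS =====

theorem detectFoldB_none (bs : List Char) (s : List Char) :
    s.foldl (detectStepB bs) none = none := by
  induction s with
  | nil => rfl
  | cons c rest ih => simpa [detectStepB] using ih

theorem detectGo_eq (bs : List Char) (s : List Char) :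
    ∀ j : Int, -(bs.length : Int) ≤ j → j ≤ (bs.length : Int) →
      detectGoA bs j s = (s.foldl (detectStepB bs) (some j)).isSome := by
  induction s with
  | nil =>
    intro j h1 h2
    simp [detectGoA, List.foldl]
    omega
  | cons c rest ih =>
    intro j h1 h2
    rw [detectGoA]
    by_cases hgt : j > (bs.length : Int)
    · omega
    · simp only [if_neg hgt, List.foldl]
      by_cases hge : j ≥ (bs.length : Int)
      · simp [detectStepB, hge, detectFoldB_none]
      · have hlt : j < (bs.length : Int) := by omega
        cases hget : PySem.List.pyGet? bs j with
        | none =>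
          exfalso
          rw [PySem.List.pyGet?_eq_none_iff] at hget
          exact hget ⟨h1, hlt⟩
        | some bc =>
          simp only [if_pos (show ¬ j ≥ (bs.length : Int) from hge), detectStepB,
            if_neg (show ¬ j ≥ (bs.length : Int) from hge), hget]
          by_cases hc : bc = c
          · rw [if_pos hc, if_neg (by simp [hc])]
            exact ih (j + 1) (by omega) (by omega)
          · simp [hc, detectFoldB_none]

theorem detectGoA_gt (bs : List Char) (i : Int) (s : List Char)
    (h : i > (bs.length : Int)) : detectGoA bs i s = false := by
  cases s <;> simp [detectGoA, h]

-- ===== VERDICT (by name: the statement is the Claim_ definition above) =====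
theorem detect_string_at_index_spec : Claim_equal_detect_string_at_index := by
  intro bs i s _ hpre
  unfold Spec_detect_string_at_index detect_string_at_index detect_string_at_index_alt
  have hlen : bs.toList.length = bs.length := String.length_toList ..
  by_cases hgt : i > (bs.toList.length : Int)
  · rw [if_pos hgt, detectGoA_gt bs.toList i s.toList hgt]
  · rw [if_neg hgt]
    rcases hpre with hempty | hge
    · subst hempty
      simp [detectGoA]
      omega
    · exact detectGo_eq bs.toList s.toList i hge (by omega)
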